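-- pv_equiv track=rewrite | github.com/kolyakpi/-python_labs_km13_chernenko | p9_chernenko/p9_chernenko_1.py | sign
-- ===== SOURCE A (Python) =====
-- def sign(number_of_permut):
--     """
--     В цій функції рахується для кожної перестановки її знак + чи -.
--     """
--     res_arr = []
--     num_mist = []
--     number_of_permutArr = list(number_of_permut)
--     for perm in number_of_permutArr:
--
--         counter = 0
--         for i in range(len(perm)):
--
--             num = int(perm[i])
--             for k in perm[i+1:]:
--                 if num > int(k):
--                     counter += 1
--         num_mist.append(counter)
--
--
--     for i in num_mist:
--         if i % 2 == 0:
--             res_arr.append("+")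
--         else:
--             res_arr.append("-")
--
--     return res_arr
-- ===== SOURCE B (Python) =====
-- def sign(number_of_permut):
--     def merge_count(left, right):
--         merged = []
--         inv = 0
--         i = j = 0
--         while i < len(left) and j < len(right):
--             if left[i] <= right[j]:
--                 merged.append(left[i])
--                 i += 1
--             else:
--                 merged.append(right[j])
--                 inv += len(left) - i
--                 j += 1
--         merged.extend(left[i:])
--         merged.extend(right[j:])
--         return merged, inv
--
--     def sort_count(a):
--         if len(a) <= 1:
--             return a, 0
--         mid = len(a) // 2
--         l, il = sort_count(a[:mid])
--         r, ir = sort_count(a[mid:])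
--         m, ic = merge_count(l, r)
--         return m, il + ir + ic
--
--     res = []
--     for perm in number_of_permut:
--         _, inv = sort_count([int(x) for x in perm])
--         res.append("+" if inv % 2 == 0 else "-")
--     return res
-- ===== Notes on version B (the rewrite author's own statement) =====
-- stated objective: alternative
-- what changed: Replaces A's quadratic double loop over suffixes with a merge-sort inversion count per permutation (strict left>right comparison), then takes the parity of the count.
import Mathlib
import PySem

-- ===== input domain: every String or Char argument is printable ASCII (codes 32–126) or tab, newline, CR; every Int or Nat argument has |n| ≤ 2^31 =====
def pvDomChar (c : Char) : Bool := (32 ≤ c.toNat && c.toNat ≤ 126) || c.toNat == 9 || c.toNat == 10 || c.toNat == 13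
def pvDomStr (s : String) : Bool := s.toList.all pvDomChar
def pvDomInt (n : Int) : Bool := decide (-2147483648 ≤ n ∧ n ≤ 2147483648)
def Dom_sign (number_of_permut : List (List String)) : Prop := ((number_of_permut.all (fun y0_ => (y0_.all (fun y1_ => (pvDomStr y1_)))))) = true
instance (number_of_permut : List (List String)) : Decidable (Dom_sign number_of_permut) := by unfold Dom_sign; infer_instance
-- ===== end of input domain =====

-- B replaces A's quadratic suffix-scan inversion count by a merge-sort inversion count of each permutation.

-- int(s); total under Pre_sign, which guarantees ofStr? is some
def pvParse (s : String) : Int := (PySem.Int.ofStr? s).getD 0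

-- ===== PORT A =====
def sign (number_of_permut : List (List String)) : List String :=
  let res_arr : List String := []
  let num_mist : List Int := []
  let number_of_permutArr := number_of_permut
  let num_mist := number_of_permutArr.foldl (fun num_mist perm =>
    let counter : Int :=
      (PySem.List.pyRange 0 (perm.length : Int) 1).foldl (fun counter i =>
        let num := pvParse (PySem.List.pyGetD perm i "")
        (PySem.List.slice perm (some (i + 1)) none).foldl
          (fun counter k => if num > pvParse k then counter + 1 else counter)
          counter) 0
    num_mist ++ [counter]) num_mist
  num_mist.foldl (fun res_arr i =>
    if PySem.Int.mod i 2 = 0 then res_arr ++ ["+"] else res_arr ++ ["-"]) res_arr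

-- ===== PORT B =====
-- merge_count from Source B: merge two lists, counting (left element, smaller right element) pairs
def pvMergeCount : List Int → List Int → List Int × Nat
  | [], right => (right, 0)
  | x :: xs, [] => (x :: xs, 0)
  | x :: xs, y :: ys =>
    if x ≤ y then
      let r := pvMergeCount xs (y :: ys)
      (x :: r.1, r.2)
    else
      let r := pvMergeCount (x :: xs) ys
      (y :: r.1, r.2 + (x :: xs).length)

-- sort_count from Source B: merge sort returning (sorted list, inversion count)
def pvSortCount (a : List Int) : List Int × Nat :=
  if _h : a.length ≤ 1 then (a, 0)
  else
    let mid := a.length / 2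
    let l := pvSortCount (a.take mid)
    let r := pvSortCount (a.drop mid)
    let m := pvMergeCount l.1 r.1
    (m.1, l.2 + r.2 + m.2)
termination_by a.length
decreasing_by
  · simp [List.length_take]; omega
  · simp [List.length_drop]; omega

def sign_alt (number_of_permut : List (List String)) : List String :=
  number_of_permut.foldl (fun res perm =>
    res ++ [if (pvSortCount (perm.map pvParse)).2 % 2 = 0 then "+" else "-"]) []

-- ===== PRECONDITION & SPEC =====
-- Pre_sign: every entry of every permutation is an int-parsable string (otherwise Python's int() raises ValueError in both A and B)
def Pre_sign (number_of_permut : List (List String)) : Prop :=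
  (number_of_permut.all (fun perm => perm.all (fun s => (PySem.Int.ofStr? s).isSome))) = true
instance (number_of_permut : List (List String)) : Decidable (Pre_sign number_of_permut) := by unfold Pre_sign; infer_instance
def pvWitness_sign : List (List String) := [["73"]]

def Spec_sign (number_of_permut : List (List String)) (out : List String) : Prop := out = sign_alt number_of_permut
instance (number_of_permut : List (List String)) (out : List String) : Decidable (Spec_sign number_of_permut out) := by unfold Spec_sign; infer_instance

-- ===== CLAIM (what is proved, stated in full; the proofs are below) =====
def Claim_equal_sign : Prop := ∀ (number_of_permut : List (List String)), Dom_sign number_of_permut → Pre_sign number_of_permut → Spec_sign number_of_permut (sign number_of_permut)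

-- ===== LEMMAS AND PROOFS =====

-- number of inversions counted the way A counts them: for each position, smaller later elements
def pvInv2 : List Int → Nat
  | [] => 0
  | x :: xs => xs.countP (fun y => decide (y < x)) + pvInv2 xs

-- cross inversions between a left block and a right block
def pvCross (l r : List Int) : Nat := (l.map (fun x => r.countP (fun y => decide (y < x)))).sum

theorem pvCross_nil_left (r : List Int) : pvCross [] r = 0 := rfl

theorem pvCross_cons_left (x : Int) (l r : List Int) :
    pvCross (x :: l) r = r.countP (fun y => decide (y < x)) + pvCross l r := by
  simp [pvCross]

theorem pvCross_cons_right (l : List Int) (y : Int) (ys : List Int) :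
    pvCross l (y :: ys) = l.countP (fun x => decide (y < x)) + pvCross l ys := by
  induction l with
  | nil => rfl
  | cons a l ih =>
    simp only [pvCross_cons_left, ih, List.countP_cons]
    by_cases h : y < a
    · simp [h]; omega
    · simp [h]; omega

theorem pvInv2_append (l r : List Int) :
    pvInv2 (l ++ r) = pvInv2 l + pvInv2 r + pvCross l r := by
  induction l with
  | nil => simp [pvInv2, pvCross_nil_left]
  | cons x l ih =>
    simp only [List.cons_append, pvInv2, ih, List.countP_append, pvCross_cons_left]
    omega

theorem pvCross_perm {l l' r r' : List Int} (hl : l.Perm l') (hr : r.Perm r') :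
    pvCross l r = pvCross l' r' := by
  have hpt : ∀ x : Int, r.countP (fun y => decide (y < x)) = r'.countP (fun y => decide (y < x)) :=
    fun x => hr.countP_eq _
  unfold pvCross
  have : l.map (fun x => r.countP (fun y => decide (y < x)))
      = l.map (fun x => r'.countP (fun y => decide (y < x))) := List.map_congr_left (fun x _ => hpt x)
  rw [this]
  exact (hl.map _).sum_eq

theorem pvMergeCount_spec : ∀ (l r : List Int), l.Pairwise (· ≤ ·) → r.Pairwise (· ≤ ·) →
    (pvMergeCount l r).1.Perm (l ++ r) ∧ (pvMergeCount l r).1.Pairwise (· ≤ ·) ∧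
    (pvMergeCount l r).2 = pvCross l r
  | [], r, _, hr => by simp [pvMergeCount, hr, pvCross_nil_left]
  | x :: xs, [], hl, _ => by simp [pvMergeCount, hl, pvCross]
  | x :: xs, y :: ys, hl, hr => by
    by_cases hxy : x ≤ y
    · have ih := pvMergeCount_spec xs (y :: ys) hl.tail hr
      simp only [pvMergeCount, if_pos hxy]
      refine ⟨?_, ?_, ?_⟩
      · exact (ih.1.cons x)
      · refine List.Pairwise.cons ?_ ih.2.1
        intro z hz
        have hz' : z ∈ xs ++ y :: ys := ih.1.mem_iff.mp hz
        rcases List.mem_append.mp hz' with h | h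
        · exact List.rel_of_pairwise_cons hl h
        · rcases h with _ | h
          · exact hxy
          · exact le_trans hxy (List.rel_of_pairwise_cons hr (by assumption))
      · rw [ih.2.2, pvCross_cons_left, pvCross_cons_right]
        have : (y :: ys).countP (fun z => decide (z < x)) = 0 := by
          rw [List.countP_eq_zero]
          intro z hz
          rcases hz with _ | hz
          · simpa using not_lt.mpr hxy
          · simp only [decide_eq_true_eq]
            exact not_lt.mpr (le_trans hxy (List.rel_of_pairwise_cons hr (by assumption)))
        omega
    · have hyx : y < x := lt_of_not_ge hxy
      have ih := pvMergeCount_spec (x :: xs) ys hl hr.tail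
      simp only [pvMergeCount, if_neg hxy]
      refine ⟨?_, ?_, ?_⟩
      · exact (ih.1.cons y).trans List.perm_middle.symm
      · refine List.Pairwise.cons ?_ ih.2.1
        intro z hz
        have hz' : z ∈ (x :: xs) ++ ys := ih.1.mem_iff.mp hz
        rcases List.mem_append.mp hz' with h | h
        · rcases h with _ | h
          · exact le_of_lt hyx
          · exact le_trans (le_of_lt hyx) (List.rel_of_pairwise_cons hl (by assumption))
        · exact List.rel_of_pairwise_cons hr h
      · rw [ih.2.2, pvCross_cons_right]
        have : (x :: xs).countP (fun z => decide (y < z)) = (x :: xs).length := by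
          rw [List.countP_eq_length]
          intro z hz
          rcases hz with _ | hz
          · simpa using hyx
          · simp only [decide_eq_true_eq]
            exact lt_of_lt_of_le hyx (le_trans (le_refl x) (List.rel_of_pairwise_cons hl (by assumption)))
        omega

theorem pvSortCount_spec (a : List Int) :
    (pvSortCount a).1.Perm a ∧ (pvSortCount a).1.Pairwise (· ≤ ·) ∧ (pvSortCount a).2 = pvInv2 a := by
  by_cases h : a.length ≤ 1
  · rw [pvSortCount, dif_pos h]
    refine ⟨List.Perm.refl a, ?_, ?_⟩
    · match a, h with
      | [], _ => exact List.Pairwise.nil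
      | [x], _ => simp
    · match a, h with
      | [], _ => rfl
      | [x], _ => simp [pvInv2]
  · rw [pvSortCount, dif_neg h]
    have hl := pvSortCount_spec (a.take (a.length / 2))
    have hr := pvSortCount_spec (a.drop (a.length / 2))
    have hm := pvMergeCount_spec _ _ hl.2.1 hr.2.1
    refine ⟨?_, hm.2.1, ?_⟩
    · exact hm.1.trans (by
        have := (hl.1.append hr.1)
        simpa [List.take_append_drop] using this)
    · simp only [hm.2.2, hl.2.2, hr.2.2]
      have hsplit := pvInv2_append (a.take (a.length / 2)) (a.drop (a.length / 2))
      rw [List.take_append_drop] at hsplit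
      have hcross : pvCross (pvSortCount (a.take (a.length / 2))).1 (pvSortCount (a.drop (a.length / 2))).1
          = pvCross (a.take (a.length / 2)) (a.drop (a.length / 2)) := pvCross_perm hl.1 hr.1
      omega
termination_by a.length
decreasing_by
  · simp [List.length_take]; omega
  · simp [List.length_drop]; omega

-- A's index/slice double loop computes pvInv2 of the parsed list
theorem pvRangeInv (l : List Int) :
    (List.range l.length).foldl
      (fun (c : Int) k => c + ((l.drop (k + 1)).countP (fun y => decide (y < l.getD k 0)) : Nat)) 0
    = (pvInv2 l : Int) := by
  suffices h : ∀ (l : List Int) (c : Int),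
      (List.range l.length).foldl
        (fun (c : Int) k => c + ((l.drop (k + 1)).countP (fun y => decide (y < l.getD k 0)) : Nat)) c
      = c + (pvInv2 l : Int) by
    simpa using h l 0
  intro l
  induction l with
  | nil => intro c; simp [pvInv2]
  | cons x xs ih =>
    intro c
    rw [List.length_cons, List.range_succ_eq_map, List.foldl_cons, List.foldl_map]
    simp only [List.getD_cons_succ, List.drop_succ_cons, List.getD_cons_zero, List.drop_zero]
    rw [ih]
    simp [pvInv2]
    ring

theorem pvInnerA_eq (perm : List String) :
    (PySem.List.pyRange 0 (perm.length : Int) 1).foldl (fun counter i =>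
        let num := pvParse (PySem.List.pyGetD perm i "")
        (PySem.List.slice perm (some (i + 1)) none).foldl
          (fun counter k => if num > pvParse k then counter + 1 else counter)
          counter) 0
    = (pvInv2 (perm.map pvParse) : Int) := by
  rw [PySem.List.pyRange_one, List.foldl_map]
  have hbody : ∀ (c : Int) (k : Nat), k < perm.length →
      (PySem.List.slice perm (some ((0 : Int) + (k : Int) + 1)) none).foldl
        (fun counter s => if pvParse (PySem.List.pyGetD perm ((0 : Int) + (k : Int)) "") > pvParse s then counter + 1 else counter) c
      = c + (((perm.map pvParse).drop (k + 1)).countP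
              (fun y => decide (y < (perm.map pvParse).getD k 0)) : Nat) := by
    intro c k hk
    have h1 : ((0 : Int) + (k : Int) + 1) = ((k + 1 : Nat) : Int) := by omega
    have h0 : ((0 : Int) + (k : Int)) = ((k : Nat) : Int) := by omega
    rw [h1, h0, PySem.List.slice_from_natCast, PySem.List.pyGetD_natCast]
    have hcif := PySem.List.foldl_count_if
      (fun s : String => decide (pvParse (perm.getD k "") > pvParse s)) (perm.drop (k + 1)) c
    simp only [decide_eq_true_eq] at hcif
    rw [hcif]
    congr 1
    rw [← List.map_drop, List.countP_map]
    have hget : (perm.map pvParse).getD k 0 = pvParse (perm.getD k "") := by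
      rw [List.getD_eq_getElem?_getD, List.getD_eq_getElem?_getD, List.getElem?_map]
      simp [List.getElem?_eq_getElem hk]
    rw [hget]
    rfl
  have hlen : ((perm.length : Int) - 0).toNat = perm.length := by omega
  rw [hlen]
  rw [PySem.List.foldl_congr_mem (List.range perm.length) _
    (fun (c : Int) (k : Nat) => c + (((perm.map pvParse).drop (k + 1)).countP
        (fun y => decide (y < (perm.map pvParse).getD k 0)) : Nat)) 0
    (fun c k hk => hbody c k (List.mem_range.mp hk))]
  have := pvRangeInv (perm.map pvParse)
  simpa using this

theorem pvMod2 (n : Nat) : (PySem.Int.mod (n : Int) 2 = 0) ↔ (n % 2 = 0) := by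
  rw [show (2 : Int) = ((2 : Nat) : Int) from rfl, PySem.Int.mod_natCast]
  exact Int.natCast_eq_zero

-- ===== VERDICT (by name: the statement is the Claim_ definition above) =====
theorem sign_spec : Claim_equal_sign := by
  intro l _ _
  unfold Spec_sign sign sign_alt
  simp only []
  rw [PySem.List.foldl_append_singleton_eq_map]
  have h2 : ∀ (init : List String) (ns : List Int),
      ns.foldl (fun res_arr i => if PySem.Int.mod i 2 = 0 then res_arr ++ ["+"] else res_arr ++ ["-"]) init
      = init ++ ns.map (fun i => if PySem.Int.mod i 2 = 0 then "+" else "-") := by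
    intro init ns
    rw [← PySem.List.foldl_append_singleton_eq_map (fun i : Int => if PySem.Int.mod i 2 = 0 then "+" else "-") ns init]
    apply PySem.List.foldl_congr_mem
    intro acc i _
    split_ifs <;> rfl
  rw [h2, PySem.List.foldl_append_singleton_eq_map]
  simp only [List.nil_append, List.map_map]
  apply List.map_congr_left
  intro perm _
  simp only [Function.comp]
  simp only [pvInnerA_eq perm]
  have hinv := (pvSortCount_spec (perm.map pvParse)).2.2
  rw [hinv]
  by_cases h : pvInv2 (perm.map pvParse) % 2 = 0
  · rw [if_pos ((pvMod2 _).mpr h), if_pos h]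
  · rw [if_neg (fun hc => h ((pvMod2 _).mp hc)), if_neg h]
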